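-- pv_equiv track=rewrite | github.com/df1116/image-transformer | image_transformer_two.py | add_coordinates
-- ===== SOURCE A (Python) =====
-- def add_coordinates(all_coordinates, coordinates, to_exclude=None):
--     """Get all the (x, y) coordinates in a 2D range."""
--     if not coordinates:
--         return all_coordinates
--     x_coordinates, y_coordinates = coordinates
--     for x in range(x_coordinates[0], x_coordinates[1] + 1):
--         for y in range(y_coordinates[0], y_coordinates[1] + 1):
--             if to_exclude is None:
--                 all_coordinates.add((x, y))
--             elif (x, y) not in to_exclude:
--                 all_coordinates.add((x, y))
--     return all_coordinates
-- ===== SOURCE B (Python) =====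
-- def add_coordinates(all_coordinates, coordinates, to_exclude=None):
--     """Get all the (x, y) coordinates in a 2D range."""
--     # B mutates all_coordinates in place, like A.
--     if not coordinates:
--         return all_coordinates
--     (x0, x1), (y0, y1) = coordinates
--     w = x1 + 1 - x0
--     h = y1 + 1 - y0
--     if w <= 0 or h <= 0:
--         return all_coordinates
--     excluded = frozenset() if to_exclude is None else frozenset(to_exclude)
--     for k in range(w * h):
--         q, r = divmod(k, h)
--         p = (x0 + q, y0 + r)
--         if p not in excluded:
--             all_coordinates.add(p)
--     return all_coordinates
-- ===== Notes on version B (the rewrite author's own statement) =====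
-- stated objective: alternative
-- what changed: B replaces A's nested x/y loops by a single flat loop over range(w*h) that recovers each point with divmod index arithmetic, detects an empty rectangle up front by a closed-form size check, and folds the None/list exclusion cases into one precomputed frozenset instead of branching per point.
import Mathlib
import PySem

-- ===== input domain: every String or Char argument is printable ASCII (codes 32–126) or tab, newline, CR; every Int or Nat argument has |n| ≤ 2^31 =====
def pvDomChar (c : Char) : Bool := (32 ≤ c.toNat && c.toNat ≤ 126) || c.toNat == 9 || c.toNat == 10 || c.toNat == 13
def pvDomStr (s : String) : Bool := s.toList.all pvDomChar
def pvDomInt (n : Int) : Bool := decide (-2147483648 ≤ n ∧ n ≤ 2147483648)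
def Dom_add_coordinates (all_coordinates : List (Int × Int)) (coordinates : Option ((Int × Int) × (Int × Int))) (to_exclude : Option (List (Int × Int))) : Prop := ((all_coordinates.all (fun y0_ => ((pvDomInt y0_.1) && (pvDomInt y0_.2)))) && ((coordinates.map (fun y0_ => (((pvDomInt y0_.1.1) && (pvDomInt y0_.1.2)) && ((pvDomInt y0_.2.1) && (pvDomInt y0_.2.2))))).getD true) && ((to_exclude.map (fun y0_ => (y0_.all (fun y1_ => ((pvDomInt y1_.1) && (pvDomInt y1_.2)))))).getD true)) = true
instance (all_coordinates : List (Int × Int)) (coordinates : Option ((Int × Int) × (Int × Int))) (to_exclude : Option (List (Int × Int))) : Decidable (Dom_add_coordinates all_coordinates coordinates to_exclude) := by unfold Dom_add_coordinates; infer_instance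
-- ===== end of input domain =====

-- B replaces A's nested x/y loops by one flat loop over range(w*h) recovering each point with
-- divmod, with a closed-form empty-rectangle check and one precomputed exclusion set
-- (objective: alternative). Both Pythons mutate all_coordinates in place; the equivalence
-- proved is about the returned value.

-- ===== PORT A =====
def add_coordinates (all_coordinates : List (Int × Int)) (coordinates : Option ((Int × Int) × (Int × Int))) (to_exclude : Option (List (Int × Int))) : List (Int × Int) :=
  match coordinates with
  | none => all_coordinates
  | some (x_coordinates, y_coordinates) =>
    (PySem.List.pyRange x_coordinates.1 (x_coordinates.2 + 1) 1).foldl (fun acc x =>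
      (PySem.List.pyRange y_coordinates.1 (y_coordinates.2 + 1) 1).foldl (fun acc2 y =>
        match to_exclude with
        | none => PySem.Set.add acc2 (x, y)
        | some ex => if (x, y) ∈ ex then acc2 else PySem.Set.add acc2 (x, y)) acc) all_coordinates

-- ===== PORT B =====
def add_coordinates_alt (all_coordinates : List (Int × Int)) (coordinates : Option ((Int × Int) × (Int × Int))) (to_exclude : Option (List (Int × Int))) : List (Int × Int) :=
  match coordinates with
  | none => all_coordinates
  | some ((x0, x1), (y0, y1)) =>
    let w : Int := x1 + 1 - x0
    let h : Int := y1 + 1 - y0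
    if w ≤ 0 ∨ h ≤ 0 then all_coordinates
    else
      let excluded : PySem.Set (Int × Int) :=
        match to_exclude with
        | none => PySem.Set.ofList []
        | some ex => PySem.Set.ofList ex
      (PySem.List.pyRange 0 (w * h) 1).foldl (fun s k =>
        let q := PySem.Int.floordiv k h
        let r := PySem.Int.mod k h
        let p : Int × Int := (x0 + q, y0 + r)
        if excluded.contains p then s else PySem.Set.add s p) all_coordinates

-- ===== PRECONDITION & SPEC =====
def Spec_add_coordinates (all_coordinates : List (Int × Int)) (coordinates : Option ((Int × Int) × (Int × Int))) (to_exclude : Option (List (Int × Int))) (out : List (Int × Int)) : Prop := out = add_coordinates_alt all_coordinates coordinates to_exclude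
instance (all_coordinates : List (Int × Int)) (coordinates : Option ((Int × Int) × (Int × Int))) (to_exclude : Option (List (Int × Int))) (out : List (Int × Int)) : Decidable (Spec_add_coordinates all_coordinates coordinates to_exclude out) := by unfold Spec_add_coordinates; infer_instance

-- ===== CLAIM (what is proved, stated in full; the proofs are below) =====
def Claim_equal_add_coordinates : Prop := ∀ (all_coordinates : List (Int × Int)) (coordinates : Option ((Int × Int) × (Int × Int))) (to_exclude : Option (List (Int × Int))), Dom_add_coordinates all_coordinates coordinates to_exclude → Spec_add_coordinates all_coordinates coordinates to_exclude (add_coordinates all_coordinates coordinates to_exclude)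


-- ===== LEMMAS AND PROOFS =====

-- Nested per-row fold = one fold over the flattened rectangle.
theorem pv_nested_foldl {S : Type} (L1 : List Int) (f : Int → List Int)
    (g : S → (Int × Int) → S) (acc : S) :
    L1.foldl (fun a x => (f x).foldl (fun a2 y => g a2 (x, y)) a) acc
      = (L1.flatMap (fun x => (f x).map (fun y => (x, y)))).foldl g acc := by
  induction L1 generalizing acc with
  | nil => rfl
  | cons a L ih =>
    simp only [List.foldl_cons, List.flatMap_cons, List.foldl_append, List.foldl_map]
    exact ih _

-- Enumerating a W×H rectangle by flat index with divmod = the row-major double enumeration.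
theorem pv_divmod_rect (W H : Nat) (hH : 0 < H) :
    (List.range (W * H)).map (fun k => (k / H, k % H))
      = (List.range W).flatMap (fun i => (List.range H).map (fun j => (i, j))) := by
  induction W with
  | zero => simp
  | succ W ih =>
    rw [Nat.succ_mul, List.range_add, List.range_succ]
    simp only [List.map_append, List.map_map, List.flatMap_append, List.flatMap_cons,
      List.flatMap_nil, List.append_nil, ih]
    congr 1
    apply List.map_congr_left
    intro j hj
    simp only [List.mem_range] at hj
    simp only [Function.comp_apply, Prod.mk.injEq]
    constructor
    · rw [Nat.mul_comm W H, Nat.mul_add_div hH, Nat.div_eq_of_lt hj]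
      omega
    · rw [Nat.mul_comm W H, Nat.mul_add_mod, Nat.mod_eq_of_lt hj]

-- A's nested conditional-add loops over the rectangle = B's guarded flat divmod loop,
-- for any exclusion list exb.
theorem pv_main (ac : List (Int × Int)) (x0 x1 y0 y1 : Int) (exb : List (Int × Int)) :
    (PySem.List.pyRange x0 (x1 + 1) 1).foldl (fun acc x =>
        (PySem.List.pyRange y0 (y1 + 1) 1).foldl (fun acc2 y =>
          if (x, y) ∈ exb then acc2 else PySem.Set.add acc2 (x, y)) acc) ac
      = if x1 + 1 - x0 ≤ 0 ∨ y1 + 1 - y0 ≤ 0 then ac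
        else (PySem.List.pyRange 0 ((x1 + 1 - x0) * (y1 + 1 - y0)) 1).foldl (fun s k =>
          if (PySem.Set.ofList exb).contains
              (x0 + PySem.Int.floordiv k (y1 + 1 - y0), y0 + PySem.Int.mod k (y1 + 1 - y0)) then s
          else PySem.Set.add s
              (x0 + PySem.Int.floordiv k (y1 + 1 - y0), y0 + PySem.Int.mod k (y1 + 1 - y0))) ac := by
  split_ifs with hdeg
  · rcases hdeg with hW | hH
    · rw [PySem.List.pyRange_one_eq_nil (by omega : x1 + 1 ≤ x0)]
      rfl
    · rw [PySem.List.pyRange_one_eq_nil (by omega : y1 + 1 ≤ y0)]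
      induction PySem.List.pyRange x0 (x1 + 1) 1 with
      | nil => rfl
      | cons a L ih => rw [List.foldl_cons]; exact ih
  · have hW : 0 < x1 + 1 - x0 := by omega
    have hH : 0 < y1 + 1 - y0 := by omega
    set g : List (Int × Int) → (Int × Int) → List (Int × Int) :=
      fun s p => if p ∈ exb then s else PySem.Set.add s p with hg
    set W : Nat := (x1 + 1 - x0).toNat with hWdef
    set H : Nat := (y1 + 1 - y0).toNat with hHdef
    have hHpos : 0 < H := by omega
    have hh : y1 + 1 - y0 = (H : Int) := by omega
    have hA : (PySem.List.pyRange x0 (x1 + 1) 1).flatMap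
        (fun x => (PySem.List.pyRange y0 (y1 + 1) 1).map (fun y => (x, y)))
        = ((List.range W).flatMap (fun i => (List.range H).map (fun j => (i, j)))).map
            (fun ij => (x0 + (ij.1 : Int), y0 + (ij.2 : Int))) := by
      rw [PySem.List.pyRange_one x0 (x1 + 1), PySem.List.pyRange_one y0 (y1 + 1)]
      simp only [List.flatMap_map, List.map_flatMap, List.map_map]
      rfl
    have hB : PySem.List.pyRange 0 ((x1 + 1 - x0) * (y1 + 1 - y0)) 1
        = (List.range (W * H)).map (fun k : Nat => (k : Int)) := by
      rw [PySem.List.pyRange_one 0]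
      have hWH : ((x1 + 1 - x0) * (y1 + 1 - y0) - 0).toNat = W * H := by
        have : (x1 + 1 - x0) * (y1 + 1 - y0) = ((W * H : Nat) : Int) := by
          push_cast
          rw [← hh, show (W : Int) = x1 + 1 - x0 by omega]
        omega
      rw [hWH]
      apply List.map_congr_left
      intro k _
      omega
    rw [pv_nested_foldl (g := g), hA, List.foldl_map, hB, List.foldl_map]
    rw [← pv_divmod_rect W H hHpos, List.foldl_map]
    apply List.foldl_ext
    intro s k hk
    have hdm : (x0 + PySem.Int.floordiv (k : Int) (y1 + 1 - y0),
        y0 + PySem.Int.mod (k : Int) (y1 + 1 - y0))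
        = (x0 + ((k / H : Nat) : Int), y0 + ((k % H : Nat) : Int)) := by
      rw [hh, PySem.Int.floordiv_natCast, PySem.Int.mod_natCast]
    rw [hdm, hg]
    simp [PySem.Set.mem_ofList]

-- ===== VERDICT (by name: the statement is the Claim_ definition above) =====
theorem add_coordinates_spec : Claim_equal_add_coordinates := by
  intro all_coordinates coordinates to_exclude _
  unfold Spec_add_coordinates add_coordinates add_coordinates_alt
  cases coordinates with
  | none => rfl
  | some c =>
    obtain ⟨⟨x0, x1⟩, ⟨y0, y1⟩⟩ := c
    cases to_exclude with
    | none =>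
      simp only
      have hbody : (PySem.List.pyRange x0 (x1 + 1) 1).foldl (fun acc x =>
              (PySem.List.pyRange y0 (y1 + 1) 1).foldl
                (fun acc2 y => PySem.Set.add acc2 (x, y)) acc) all_coordinates
          = (PySem.List.pyRange x0 (x1 + 1) 1).foldl (fun acc x =>
              (PySem.List.pyRange y0 (y1 + 1) 1).foldl
                (fun acc2 y => if (x, y) ∈ ([] : List (Int × Int)) then acc2
                  else PySem.Set.add acc2 (x, y)) acc) all_coordinates := by
        apply List.foldl_ext
        intro acc x _
        apply List.foldl_ext
        intro acc2 y _
        simp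
      rw [hbody, pv_main]
    | some ex =>
      simp only
      rw [pv_main]
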